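-- pv_equiv track=rewrite | github.com/aa0909555625-cell/investment-assistant | scripts/backtest_portfolio_v3.py | _prev_trading_date
-- ===== SOURCE A (Python) =====
-- from typing import Dict, List, Optional, Tuple
--
-- def _sorted_dates(dates: List[str]) -> List[str]:
--     # dates are YYYY-MM-DD; string sort works
--     return sorted({str(d) for d in dates})
--
-- def _prev_trading_date(target_prev: str, available_dates: List[str]) -> Optional[str]:
--     """Find the nearest date <= target_prev in available_dates."""
--     if not available_dates:
--         return None
--     ds = _sorted_dates(available_dates)
--     # binary-ish scan backwards (small N is fine)
--     for d in reversed(ds):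
--         if d <= target_prev:
--             return d
--     return None
-- ===== SOURCE B (Python) =====
-- from typing import List, Optional
--
-- def _prev_trading_date(target_prev: str, available_dates: List[str]) -> Optional[str]:
--     """Find the nearest date <= target_prev in available_dates."""
--     best = None
--     for d in available_dates:
--         d = str(d)
--         if d <= target_prev and (best is None or best < d):
--             best = d
--     return best
-- ===== Notes on version B (the rewrite author's own statement) =====
-- stated objective: faster
-- what changed: Replaced A's build-a-set, sort, then scan-backwards-for-the-first-match pipeline with a single forward pass over the raw list that keeps the largest date <= target_prev in an accumulator.
import Mathlib
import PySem

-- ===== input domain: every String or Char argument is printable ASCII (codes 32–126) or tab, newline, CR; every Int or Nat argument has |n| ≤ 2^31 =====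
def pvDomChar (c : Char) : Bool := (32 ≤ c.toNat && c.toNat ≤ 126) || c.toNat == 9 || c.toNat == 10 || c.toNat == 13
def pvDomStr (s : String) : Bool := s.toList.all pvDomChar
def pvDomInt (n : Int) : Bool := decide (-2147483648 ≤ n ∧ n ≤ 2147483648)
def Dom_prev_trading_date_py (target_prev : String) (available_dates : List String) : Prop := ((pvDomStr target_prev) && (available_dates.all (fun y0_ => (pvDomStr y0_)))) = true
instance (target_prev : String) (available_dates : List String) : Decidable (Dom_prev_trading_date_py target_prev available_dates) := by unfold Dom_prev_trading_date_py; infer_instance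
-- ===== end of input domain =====

-- B replaces A's dedup-sort-and-backward-scan with a single forward pass keeping the best
-- date ≤ target (objective: faster, O(n) vs O(n log n); no set, no sort). Return values agree on all inputs.

-- ===== PORT A =====
-- helper _sorted_dates: sorted({str(d) for d in dates}); str(d) is the identity on strings
def sorted_dates_py (dates : List String) : List String :=
  PySem.List.sorted (PySem.Set.ofList dates) (fun x => x) false

-- 'for d in reversed(ds): if d <= target_prev: return d' / fall through to 'return None'
def findLeRevA (target_prev : String) : List String → Option String
  | [] => none
  | d :: rest => if d ≤ target_prev then some d else findLeRevA target_prev rest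

def prev_trading_date_py (target_prev : String) (available_dates : List String) : Option String :=
  if available_dates = [] then none
  else
    let ds := sorted_dates_py available_dates
    findLeRevA target_prev ds.reverse

-- ===== PORT B =====
-- loop body: 'if d <= target_prev and (best is None or best < d): best = d'
def stepB (target_prev : String) (best : Option String) (d : String) : Option String :=
  if decide (d ≤ target_prev) && best.elim true (fun b => decide (b < d)) then some d else best

def prev_trading_date_py_alt (target_prev : String) (available_dates : List String) : Option String :=
  available_dates.foldl (stepB target_prev) none

-- ===== PRECONDITION & SPEC =====
def Spec_prev_trading_date_py (target_prev : String) (available_dates : List String) (out : Option String) : Prop := out = prev_trading_date_py_alt target_prev available_dates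
instance (target_prev : String) (available_dates : List String) (out : Option String) : Decidable (Spec_prev_trading_date_py target_prev available_dates out) := by unfold Spec_prev_trading_date_py; infer_instance

-- ===== CLAIM (what is proved, stated in full; the proofs are below) =====
def Claim_equal_prev_trading_date_py : Prop := ∀ (target_prev : String) (available_dates : List String), Dom_prev_trading_date_py target_prev available_dates → Spec_prev_trading_date_py target_prev available_dates (prev_trading_date_py target_prev available_dates)

-- ===== LEMMAS AND PROOFS =====

-- option-level max, used only to state B's loop invariant
def omax : Option String → Option String → Option String
  | none, b => b
  | a, none => a
  | some x, some y => some (max x y)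

lemma omax_none_right (a : Option String) : omax a none = a := by
  cases a <;> rfl

lemma max?_cons_eq_omax (d : String) (m : List String) :
    (d :: m).max? = omax (some d) m.max? := by
  cases m with
  | nil => rfl
  | cons a t =>
      show some ((a :: t).foldl max d) = omax (some d) (some (t.foldl max a))
      show some (t.foldl max (max d a)) = some (max d (t.foldl max a))
      rw [List.foldl_assoc]

lemma stepB_none_of_le (t d : String) (hd : d ≤ t) : stepB t none d = some d := by
  unfold stepB
  rw [decide_eq_true hd]
  rfl

lemma stepB_some_of_lt (t d b : String) (hd : d ≤ t) (hbd : b < d) :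
    stepB t (some b) d = some d := by
  unfold stepB
  rw [decide_eq_true hd]
  show (if (true && decide (b < d)) = true then some d else some b) = some d
  rw [decide_eq_true hbd]
  rfl

lemma stepB_some_of_ge (t d b : String) (hbd : ¬ b < d) :
    stepB t (some b) d = some b := by
  unfold stepB
  show (if (decide (d ≤ t) && decide (b < d)) = true then some d else some b) = some b
  rw [decide_eq_false hbd]
  simp

lemma stepB_of_gt (t d : String) (acc : Option String) (hd : ¬ d ≤ t) :
    stepB t acc d = acc := by
  unfold stepB
  rw [decide_eq_false hd]
  simp

-- B's loop invariant: the fold computes the option-max of the accepted elements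
lemma foldB_eq (t : String) : ∀ (l : List String) (acc : Option String),
    l.foldl (stepB t) acc = omax acc (l.filter (fun d => decide (d ≤ t))).max? := by
  intro l
  induction l with
  | nil => intro acc; simp [omax_none_right]
  | cons d l ih =>
      intro acc
      rw [List.foldl_cons, ih]
      by_cases hd : d ≤ t
      · rw [List.filter_cons_of_pos (p := fun x => decide (x ≤ t)) (decide_eq_true hd), max?_cons_eq_omax]
        cases acc with
        | none => rw [stepB_none_of_le t d hd]; rfl
        | some b =>
            by_cases hbd : b < d
            · rw [stepB_some_of_lt t d b hd hbd]
              cases (l.filter (fun d => decide (d ≤ t))).max? with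
              | none =>
                  show some d = some (max b d)
                  rw [max_eq_right (le_of_lt hbd)]
              | some m =>
                  show some (max d m) = some (max b (max d m))
                  rw [max_eq_right (le_trans (le_of_lt hbd) (le_max_left d m))]
            · have hdb : d ≤ b := le_of_not_gt hbd
              rw [stepB_some_of_ge t d b hbd]
              cases (l.filter (fun d => decide (d ≤ t))).max? with
              | none =>
                  show some b = some (max b d)
                  rw [max_eq_left hdb]
              | some m =>
                  show some (max b m) = some (max b (max d m))
                  rw [← max_assoc, max_eq_left hdb]
      · rw [List.filter_cons_of_neg (p := fun x => decide (x ≤ t)) (by simp [hd]), stepB_of_gt t d acc hd]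

lemma altB_eq_max?_filter (t : String) (ads : List String) :
    prev_trading_date_py_alt t ads = (ads.filter (fun d => decide (d ≤ t))).max? := by
  unfold prev_trading_date_py_alt
  rw [foldB_eq]
  rfl

-- A's backward scan is the head of the filtered list
lemma findLeRevA_eq_head_filter (t : String) : ∀ (l : List String),
    findLeRevA t l = (l.filter (fun d => decide (d ≤ t))).head? := by
  intro l
  induction l with
  | nil => rfl
  | cons d l ih =>
      show (if d ≤ t then some d else findLeRevA t l) = _
      by_cases hd : d ≤ t
      · rw [if_pos hd, List.filter_cons_of_pos (p := fun x => decide (x ≤ t)) (decide_eq_true hd)]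
        rfl
      · rw [if_neg hd, List.filter_cons_of_neg (p := fun x => decide (x ≤ t)) (by simp [hd]), ih]

-- last element of a ≤-sorted list is its max
lemma getLast?_eq_max?_of_pairwise : ∀ (l : List String),
    l.Pairwise (· ≤ ·) → l.getLast? = l.max? := by
  intro l
  induction l with
  | nil => intro _; rfl
  | cons a l ih =>
      intro hp
      cases l with
      | nil => rfl
      | cons b t =>
          have hab : a ≤ b := (List.pairwise_cons.mp hp).1 b (by simp)
          have htl : (b :: t).Pairwise (· ≤ ·) := (List.pairwise_cons.mp hp).2
          rw [List.getLast?_cons_cons, ih htl]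
          show some (t.foldl max b) = some ((b :: t).foldl max a)
          show some (t.foldl max b) = some (t.foldl max (max a b))
          rw [max_eq_right hab]

-- max? depends only on the set of members
lemma max?_eq_of_mem_iff (xs ys : List String) (h : ∀ x, x ∈ xs ↔ x ∈ ys) :
    xs.max? = ys.max? := by
  cases hx : xs.max? with
  | none =>
      rw [List.max?_eq_none_iff] at hx
      subst hx
      cases hy : ys.max? with
      | none => rfl
      | some m =>
          have hm := (List.max?_eq_some_iff.mp hy).1
          exact absurd ((h m).mpr hm) (by simp)
  | some m =>
      have ⟨hm, hb⟩ := List.max?_eq_some_iff.mp hx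
      symm
      rw [List.max?_eq_some_iff]
      exact ⟨(h m).mp hm, fun y hy => hb y ((h y).mpr hy)⟩

-- ===== VERDICT (by name: the statement is the Claim_ definition above) =====
theorem prev_trading_date_py_spec : Claim_equal_prev_trading_date_py := by
  intro t ads _
  unfold Spec_prev_trading_date_py
  rw [altB_eq_max?_filter]
  unfold prev_trading_date_py
  by_cases hnil : ads = []
  · subst hnil; rfl
  · simp only [hnil, if_false]
    rw [findLeRevA_eq_head_filter, List.filter_reverse, List.head?_reverse]
    have hds : (sorted_dates_py ads).Pairwise (· < ·) := by
      unfold sorted_dates_py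
      exact PySem.List.sorted_ofList_pairwise_lt ads
    have hpf : ((sorted_dates_py ads).filter (fun d => decide (d ≤ t))).Pairwise (· ≤ ·) :=
      (hds.filter _).imp (fun h => le_of_lt h)
    rw [getLast?_eq_max?_of_pairwise _ hpf]
    apply max?_eq_of_mem_iff
    intro x
    simp only [List.mem_filter]
    constructor
    · rintro ⟨hx, hle⟩
      exact ⟨(PySem.Set.mem_ofList ads x).mp
        ((PySem.List.mem_sorted _ _ _ _).mp hx), hle⟩
    · rintro ⟨hx, hle⟩
      exact ⟨(PySem.List.mem_sorted _ _ _ _).mpr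
        ((PySem.Set.mem_ofList ads x).mpr hx), hle⟩
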